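-- pv_equiv track=rewrite | github.com/Bharathi-raja-pbr/HackerRank | Let's Review.py | func
-- ===== SOURCE A (Python) =====
-- def func(s):
--     a=b=''
--     for i in range(0,len(s)):
--         if i%2==0:
--             a+=s[i]
--         else:
--             b+=s[i]
--     return a+' '+b
-- ===== SOURCE B (Python) =====
-- def func(s):
--     return s[::2] + ' ' + s[1::2]
-- ===== Notes on version B (the rewrite author's own statement) =====
-- stated objective: faster
-- what changed: Replaces the index loop with its parity branch and two string accumulators by two strided slices (step 2, offsets 0 and 1) joined by a single space.
import Mathlib
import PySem

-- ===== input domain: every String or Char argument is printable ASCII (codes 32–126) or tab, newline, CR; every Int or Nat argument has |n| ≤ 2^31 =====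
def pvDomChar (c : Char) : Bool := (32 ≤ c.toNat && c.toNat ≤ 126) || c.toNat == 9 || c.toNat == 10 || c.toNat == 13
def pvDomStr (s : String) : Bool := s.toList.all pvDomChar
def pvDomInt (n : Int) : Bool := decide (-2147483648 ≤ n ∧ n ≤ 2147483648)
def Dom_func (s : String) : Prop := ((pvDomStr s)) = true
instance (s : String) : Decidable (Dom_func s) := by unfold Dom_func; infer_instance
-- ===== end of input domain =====

-- B replaces A's index loop (parity branch + two accumulators) by two strided slices; same value, more idiomatic.

-- ===== PORT A =====
-- for i in range(0, len(s)): if i%2==0: a+=s[i] else: b+=s[i]; return a+' '+b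
def func (s : String) : String :=
  let l := s.toList
  let p := (PySem.List.pyRange 0 l.length 1).foldl
    (fun (ab : List Char × List Char) i =>
      if i % 2 = 0 then (ab.1 ++ [PySem.List.pyGetD l i ' '], ab.2)
      else (ab.1, ab.2 ++ [PySem.List.pyGetD l i ' ']))
    ([], [])
  String.ofList (p.1 ++ ' ' :: p.2)

-- ===== PORT B =====
-- return s[::2] + ' ' + s[1::2]
def func_alt (s : String) : String :=
  match PySem.Str.slice? s none none 2, PySem.Str.slice? s (some 1) none 2 with
  | some ev, some od => ev ++ " " ++ od
  | _, _ => ""   -- unreachable: step 2 ≠ 0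

-- ===== PRECONDITION & SPEC =====
def Spec_func (s : String) (out : String) : Prop := out = func_alt s
instance (s : String) (out : String) : Decidable (Spec_func s out) := by unfold Spec_func; infer_instance

-- ===== CLAIM (what is proved, stated in full; the proofs are below) =====
def Claim_equal_func : Prop := ∀ (s : String), Dom_func s → Spec_func s (func s)

-- ===== LEMMAS AND PROOFS =====

def pvEvens {α : Type} : List α → List α
  | [] => []
  | [x] => [x]
  | x :: _ :: xs => x :: pvEvens xs

def pvOdds {α : Type} : List α → List α
  | [] => []
  | _ :: xs => pvEvens xs

theorem pvEvens_cons {α : Type} (x : α) (xs : List α) :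
    pvEvens (x :: xs) = x :: pvOdds xs := by
  cases xs <;> rfl

theorem pvEvens_spec {α : Type} (l : List α) :
    (List.range ((l.length + 1) / 2)).filterMap (fun k => l[2 * k]?) = pvEvens l := by
  induction l using pvEvens.induct with
  | case1 => simp [pvEvens]
  | case2 x => simp [pvEvens]
  | case3 x y xs ih =>
    have hc : ((x :: y :: xs : List α).length + 1) / 2 = (xs.length + 1) / 2 + 1 := by
      simp; omega
    rw [hc, List.range_succ_eq_map]
    simp only [List.filterMap_cons, List.filterMap_map]
    have hf : ((fun k : Nat => (x :: y :: xs)[2 * k]?) ∘ Nat.succ) = fun k : Nat => xs[2 * k]? := by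
      funext k
      have h2 : 2 * Nat.succ k = 2 * k + 1 + 1 := by omega
      simp [Function.comp, h2]
    simp only [hf, ih]
    rfl

theorem pvOdds_spec {α : Type} (l : List α) :
    (List.range (l.length / 2)).filterMap (fun k => l[2 * k + 1]?) = pvOdds l := by
  rcases l with _ | ⟨x, xs⟩
  · simp [pvOdds]
  · have hc : (x :: xs : List α).length / 2 = (xs.length + 1) / 2 := by simp
    have hf : (fun k : Nat => (x :: xs)[2 * k + 1]?) = fun k : Nat => xs[2 * k]? := by
      funext k; simp
    rw [hc, hf, pvEvens_spec]
    rfl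

theorem pvSlice2_evens {α : Type} (l : List α) :
    PySem.List.slice? l none none 2 = some (pvEvens l) := by
  rw [← pvEvens_spec]
  simp only [PySem.List.slice?, PySem.List.sliceIndices]
  norm_num
  have hf : (fun x : Nat => l[((2:Int) * (x:Int)).toNat]?) = fun k : Nat => l[2*k]? := by
    funext k
    have h2 : ((2:Int) * (k:Int)).toNat = 2*k := by omega
    rw [h2]
  rw [hf]
  congr 2
  split_ifs with h <;> omega

theorem pvSlice2_odds {α : Type} (l : List α) :
    PySem.List.slice? l (some 1) none 2 = some (pvOdds l) := by
  rw [← pvOdds_spec]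
  rcases l with _ | ⟨x, xs⟩
  · simp [PySem.List.slice?, PySem.List.sliceIndices]
  · simp only [PySem.List.slice?, PySem.List.sliceIndices]
    norm_num
    have hf : (fun k : Nat => (x::xs)[((1:Int) + 2 * (k:Int)).toNat]?) = fun k : Nat => xs[2*k]? := by
      funext k
      have h2 : ((1:Int) + 2 * (k:Int)).toNat = 2*k+1 := by omega
      rw [h2]
      simp
    rw [hf]
    congr 2
    split_ifs with h <;> omega

theorem pvFoldA (full : List Char) (l : List Char) :
    ∀ (j : Nat) (a b : List Char), full.drop j = l →
    (PySem.List.pyRange j full.length 1).foldl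
      (fun (ab : List Char × List Char) i =>
        if i % 2 = 0 then (ab.1 ++ [PySem.List.pyGetD full i ' '], ab.2)
        else (ab.1, ab.2 ++ [PySem.List.pyGetD full i ' '])) (a, b) =
      if j % 2 = 0 then (a ++ pvEvens l, b ++ pvOdds l)
      else (a ++ pvOdds l, b ++ pvEvens l) := by
  induction l with
  | nil =>
    intro j a b hd
    have hlen : full.length ≤ j := by
      by_contra h
      have := List.drop_eq_nil_iff.mp hd
      omega
    rw [PySem.List.pyRange_one_eq_nil (by exact_mod_cast hlen)]
    split_ifs <;> simp [pvEvens, pvOdds]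
  | cons x xs ih =>
    intro j a b hd
    have hj : j < full.length := by
      by_contra h
      rw [List.drop_eq_nil_iff.mpr (by omega)] at hd
      simp at hd
    have hget : full[j]? = some x := by
      have h0 : (full.drop j)[0]? = full[j]? := by
        simp
      rw [hd] at h0
      simpa using h0.symm
    have hgetD : PySem.List.pyGetD full (j : Int) ' ' = x := by
      simp [PySem.List.pyGetD, hget]
    have hd' : full.drop (j + 1) = xs := by
      rw [← List.drop_drop, hd]
      rfl
    rw [PySem.List.pyRange_one_cons (by exact_mod_cast hj)]
    simp only [List.foldl_cons]
    have hcast : ((j : Int) + 1) = ((j + 1 : Nat) : Int) := by push_cast; ring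
    by_cases hpar : j % 2 = 0
    · have hip : (j : Int) % 2 = 0 := by omega
      rw [if_pos hip]
      simp only [hgetD]
      rw [hcast, ih (j + 1) (a ++ [x]) b hd']
      have : ¬ (j + 1) % 2 = 0 := by omega
      rw [if_neg this, if_pos hpar, pvEvens_cons]
      simp [pvOdds]
    · have hip : ¬ (j : Int) % 2 = 0 := by omega
      rw [if_neg hip]
      simp only [hgetD]
      rw [hcast, ih (j + 1) a (b ++ [x]) hd']
      have : (j + 1) % 2 = 0 := by omega
      rw [if_pos this, if_neg hpar, pvEvens_cons]
      simp [pvOdds]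

-- ===== VERDICT (by name: the statement is the Claim_ definition above) =====
theorem func_spec : Claim_equal_func := by
  intro s _
  unfold Spec_func
  have hA := pvFoldA s.toList s.toList 0 [] [] (by simp)
  simp only [Nat.cast_zero, Nat.zero_mod, if_true, List.nil_append] at hA
  simp only [func, func_alt]
  rw [hA]
  simp only [PySem.Str.slice?, PySem.Chars.slice?_eq_listSlice?, pvSlice2_evens, pvSlice2_odds,
    Option.map_some]
  have h1 : pvEvens s.toList ++ ' ' :: pvOdds s.toList
      = pvEvens s.toList ++ [' '] ++ pvOdds s.toList := by simp
  rw [h1, String.ofList_append, String.ofList_append]
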